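-- pv_equiv track=rewrite | github.com/Jobin-Nelson/learn | competitive_programming/2024/july/sort-the-jumbled-numbers.py | sortJumbled
-- ===== SOURCE A (Python) =====
-- def sortJumbled(mapping: list[int], nums: list[int]) -> list[int]:
--     mapped_nums = [0] * len(nums)
--
--     for i, n in enumerate(nums):
--         cur = n
--         num = 0
--         place = 1
--         if cur == 0:
--             mapped_nums[i] = mapping[0]
--             continue
--         while cur:
--             num = place * mapping[cur % 10] + num
--             cur //= 10
--             place *= 10
--         mapped_nums[i] = num
--
--     sorted_indices = sorted(range(len(nums)), key=lambda i: (mapped_nums[i], i))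
--     return [nums[i] for i in sorted_indices]
-- ===== SOURCE B (Python) =====
-- def sortJumbled(mapping: list[int], nums: list[int]) -> list[int]:
--     def map_val(n: int) -> int:
--         v = 0
--         for c in str(n):
--             v = 10 * v + mapping[ord(c) - 48]
--         return v
--
--     return sorted(nums, key=map_val)
-- ===== Notes on version B (the rewrite author's own statement) =====
-- stated objective: simpler
-- what changed: B maps each number through its decimal string (most-significant-first Horner over the digit characters) and returns sorted(nums, key=map_val) directly, relying on sort stability for the index tie-break, instead of A's least-significant-first %10///10 place-value loop, explicit mapped_nums array, argsort of range(len) with a (value, index) tuple key, and a final gather pass.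
import Mathlib
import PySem

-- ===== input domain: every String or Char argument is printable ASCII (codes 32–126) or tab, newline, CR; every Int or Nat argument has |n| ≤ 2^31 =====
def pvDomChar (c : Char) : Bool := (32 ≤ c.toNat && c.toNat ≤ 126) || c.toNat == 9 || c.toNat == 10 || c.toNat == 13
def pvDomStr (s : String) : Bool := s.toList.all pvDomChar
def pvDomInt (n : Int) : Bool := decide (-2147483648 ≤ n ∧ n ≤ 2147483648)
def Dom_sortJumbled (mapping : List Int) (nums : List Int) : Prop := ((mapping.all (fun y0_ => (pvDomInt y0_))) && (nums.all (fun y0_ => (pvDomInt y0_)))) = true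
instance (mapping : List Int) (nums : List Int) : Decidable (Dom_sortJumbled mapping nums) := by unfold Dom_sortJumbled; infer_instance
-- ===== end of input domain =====

-- B replaces A's least-significant-first %10///10 place-value loop and argsort-of-range(len)
-- with a string-digit Horner key and a direct stable sorted(nums, key=...): simpler decomposition.

-- ===== PORT A =====
-- the `while cur:` loop; `fuel` only makes the recursion structural (Python diverges for cur < 0,
-- which Pre_ excludes; for 0 < cur the loop runs at most cur steps, so fuel = cur.toNat + 1 is enough)
def aMapVal (mapping : List Int) : Nat → Int → Int → Int → Option Int
  | 0, _, _, _ => none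
  | fuel + 1, cur, num, place =>
    if cur = 0 then some num
    else
      match PySem.List.pyGet? mapping (PySem.Int.mod cur 10) with
      | none => none   -- IndexError
      | some m => aMapVal mapping fuel (PySem.Int.floordiv cur 10) (place * m + num) (place * 10)

def sortJumbled (mapping : List Int) (nums : List Int) : List Int :=
  -- the `for i, n in enumerate(nums)` loop building mapped_nums, with IndexError propagated
  match nums.mapM (fun n => if n = 0 then PySem.List.pyGet? mapping 0
                            else aMapVal mapping (n.toNat + 1) n 0 1) with
  | none => []   -- unreachable under Pre_ (Python raised)
  | some mapped =>
    let sortedIndices := PySem.List.sorted2 (PySem.List.pyRange 0 (PySem.List.len nums))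
      (fun i => PySem.List.pyGetD mapped i 0) (fun i => i)
    -- indices from range(len(nums)) are in range, so nums[i] never raises: pyGetD is exact here
    sortedIndices.map (fun i => PySem.List.pyGetD nums i 0)

-- ===== PORT B =====
-- `v = 0; for c in str(n): v = 10 * v + mapping[ord(c) - 48]`, with IndexError propagated
def bMapVal (mapping : List Int) (n : Int) : Option Int :=
  (PySem.Int.toChars n).foldl
    (fun acc c =>
      match acc with
      | none => none
      | some v =>
        match PySem.List.pyGet? mapping ((c.toNat : Int) - 48) with
        | none => none   -- IndexError
        | some m => some (10 * v + m))
    (some 0)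

def sortJumbled_alt (mapping : List Int) (nums : List Int) : List Int :=
  -- sorted(nums, key=map_val): Python computes all keys first (raising there), then sorts stably
  match nums.mapM (fun n => bMapVal mapping n) with
  | none => []   -- unreachable under Pre_ (Python raised)
  | some _ => PySem.List.sorted nums (fun n => (bMapVal mapping n).getD 0)

-- ===== PRECONDITION & SPEC =====
-- the decimal digits Python A looks up in `mapping` for the number m (n == 0 reads mapping[0])
def reqDigits (m : Nat) : List Nat := if m = 0 then [0] else Nat.digits 10 m

-- exactly A's return domain: a negative num makes A loop forever, and a decimal digit ≥ len(mapping)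
-- makes A raise IndexError
def Pre_sortJumbled (mapping : List Int) (nums : List Int) : Prop :=
  ∀ n ∈ nums, 0 ≤ n ∧ ∀ d ∈ reqDigits n.toNat, d < mapping.length
instance (mapping : List Int) (nums : List Int) : Decidable (Pre_sortJumbled mapping nums) := by
  unfold Pre_sortJumbled; infer_instance

def pvWitness_sortJumbled : List Int × List Int := ([8, 9, 4], [12, 21, 0, 102])

def Spec_sortJumbled (mapping : List Int) (nums : List Int) (out : List Int) : Prop :=
  out = sortJumbled_alt mapping nums
instance (mapping : List Int) (nums : List Int) (out : List Int) :
    Decidable (Spec_sortJumbled mapping nums out) := by unfold Spec_sortJumbled; infer_instance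

-- ===== CLAIM (what is proved, stated in full; the proofs are below) =====
def Claim_equal_sortJumbled : Prop := ∀ (mapping : List Int) (nums : List Int),
  Dom_sortJumbled mapping nums → Pre_sortJumbled mapping nums →
  Spec_sortJumbled mapping nums (sortJumbled mapping nums)

-- ===== LEMMAS AND PROOFS =====

-- the common mapped value: Horner over the decimal digits (little-endian foldr)
def cVal (mapping : List Int) (m : Nat) : Int :=
  (Nat.digits 10 m).foldr (fun d acc => acc * 10 + mapping.getD d 0) 0

-- the mapped value both programs assign to a number
def kVal (mapping : List Int) (n : Int) : Int :=
  if n = 0 then mapping.getD 0 0 else cVal mapping n.toNat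

theorem pyGet?_nat_of_lt (xs : List Int) (d : Nat) (h : d < xs.length) :
    PySem.List.pyGet? xs (d : Int) = some (xs.getD d 0) := by
  simp [PySem.List.pyGet?, PySem.List.pyIdx?, h]

theorem cVal_step (mapping : List Int) (m : Nat) (hm : 0 < m) :
    cVal mapping m = cVal mapping (m / 10) * 10 + mapping.getD (m % 10) 0 := by
  unfold cVal; rw [Nat.digits_def' (by norm_num) hm]; simp

theorem aMapVal_eq (mapping : List Int) :
    ∀ (fuel m : Nat) (num place : Int), m < fuel →
      (∀ d ∈ Nat.digits 10 m, d < mapping.length) →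
      aMapVal mapping fuel (m : Int) num place = some (place * cVal mapping m + num) := by
  intro fuel
  induction fuel with
  | zero => intro m num place h; omega
  | succ f ih =>
    intro m num place hlt hd
    by_cases hm : m = 0
    · subst hm; simp [aMapVal, cVal]
    · have hm0 : 0 < m := Nat.pos_of_ne_zero hm
      have hmod : m % 10 ∈ Nat.digits 10 m := by
        rw [Nat.digits_def' (by norm_num) hm0]; exact List.mem_cons_self
      have hcast : ((m : Int)) ≠ 0 := by exact_mod_cast hm
      have h10 : PySem.Int.mod (m : Int) 10 = ((m % 10 : Nat) : Int) := by
        exact_mod_cast PySem.Int.mod_natCast m 10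
      rw [aMapVal, if_neg hcast, h10, pyGet?_nat_of_lt mapping (m % 10) (hd _ hmod)]
      have hfd : PySem.Int.floordiv (m : Int) 10 = ((m / 10 : Nat) : Int) := by
        exact_mod_cast PySem.Int.floordiv_natCast m 10
      rw [hfd]
      have hd' : ∀ d ∈ Nat.digits 10 (m / 10), d < mapping.length := by
        intro d hdm
        apply hd
        rw [Nat.digits_def' (by norm_num) hm0]
        exact List.mem_cons_of_mem _ hdm
      simp only []
      rw [ih (m / 10) (place * mapping.getD (m % 10) 0 + num) (place * 10) (by omega) hd']
      rw [cVal_step mapping m hm0]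
      ring_nf

theorem digitChar_sub_48 (d : Nat) (h : d < 10) :
    ((Nat.digitChar d).toNat : Int) - 48 = (d : Int) := by
  interval_cases d <;> rfl

theorem bfold_eq (mapping : List Int) :
    ∀ (m : Nat), 0 < m →
    (∀ d ∈ Nat.digits 10 m, d < mapping.length) → ∀ (v : Int),
    (Nat.toDigits 10 m).foldl
      (fun acc c =>
        match acc with
        | none => none
        | some v =>
          match PySem.List.pyGet? mapping ((c.toNat : Int) - 48) with
          | none => none
          | some m => some (10 * v + m))
      (some v)
    = some (v * 10 ^ (Nat.digits 10 m).length + cVal mapping m) := by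
  intro m
  induction m using Nat.strong_induction_on with
  | _ m ih =>
    intro hm hd v
    have hlast : m % 10 ∈ Nat.digits 10 m := by
      rw [Nat.digits_def' (by norm_num) hm]; exact List.mem_cons_self
    have hlen : m % 10 < mapping.length := hd _ hlast
    by_cases hsm : m < 10
    · rw [Nat.toDigits_of_lt_base hsm]
      have hm10 : m % 10 = m := Nat.mod_eq_of_lt hsm
      simp only [List.foldl_cons, List.foldl_nil]
      rw [digitChar_sub_48 m hsm, pyGet?_nat_of_lt mapping m (hm10 ▸ hlen)]
      have hdig : Nat.digits 10 m = [m] := by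
        rw [Nat.digits_def' (by norm_num) hm, hm10, Nat.div_eq_of_lt hsm, Nat.digits_zero]
      rw [cVal, hdig]
      simp; ring
    · have h10 : 10 ≤ m := by omega
      have hq : 0 < m / 10 := Nat.div_pos (by omega) (by norm_num)
      have hsplit : Nat.toDigits 10 m = Nat.toDigits 10 (m / 10) ++ [(m % 10).digitChar] := by
        rw [Nat.toDigits_eq_if (by norm_num : (1:Nat) < 10), if_neg (by omega)]
      have hd' : ∀ d ∈ Nat.digits 10 (m / 10), d < mapping.length := by
        intro d hdm; apply hd; rw [Nat.digits_def' (by norm_num) hm]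
        exact List.mem_cons_of_mem _ hdm
      rw [hsplit, List.foldl_append, ih (m / 10) (by omega) hq hd' v]
      simp only [List.foldl_cons, List.foldl_nil]
      rw [digitChar_sub_48 (m % 10) (Nat.mod_lt _ (by norm_num)),
        pyGet?_nat_of_lt mapping (m % 10) hlen]
      simp only []
      rw [cVal_step mapping m hm]
      have hlendig : (Nat.digits 10 m).length = (Nat.digits 10 (m / 10)).length + 1 := by
        rw [Nat.digits_def' (by norm_num) hm]; simp
      rw [hlendig]
      ring_nf

theorem aVal_some (mapping : List Int) (n : Int) (h0 : 0 ≤ n)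
    (hd : ∀ d ∈ reqDigits n.toNat, d < mapping.length) :
    (if n = 0 then PySem.List.pyGet? mapping 0 else aMapVal mapping (n.toNat + 1) n 0 1)
      = some (kVal mapping n) := by
  by_cases hn : n = 0
  · subst hn
    have h0len : 0 < mapping.length := by have := hd 0 (by simp [reqDigits]); omega
    rw [if_pos rfl, show (0:Int) = ((0:Nat):Int) by rfl, pyGet?_nat_of_lt mapping 0 h0len]
    simp [kVal]
  · have hm : 0 < n.toNat := by omega
    have hd' : ∀ d ∈ Nat.digits 10 n.toNat, d < mapping.length := by
      intro d hdm; apply hd; rw [reqDigits, if_neg (by omega)]; exact hdm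
    rw [if_neg hn, show n = ((n.toNat : Nat) : Int) by omega]
    rw [show ((n.toNat : Nat) : Int).toNat = n.toNat by omega]
    rw [aMapVal_eq mapping (n.toNat + 1) n.toNat 0 1 (by omega) hd']
    rw [kVal, if_neg (by omega)]
    norm_num
    congr 1
    omega

theorem bVal_some (mapping : List Int) (n : Int) (h0 : 0 ≤ n)
    (hd : ∀ d ∈ reqDigits n.toNat, d < mapping.length) :
    bMapVal mapping n = some (kVal mapping n) := by
  have htc : PySem.Int.toChars n = Nat.toDigits 10 n.toNat := by
    simp [PySem.Int.toChars, not_lt.mpr h0]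
  by_cases hn : n = 0
  · subst hn
    have h0len : 0 < mapping.length := by
      have := hd 0 (by simp [reqDigits]); omega
    simp only [bMapVal, htc]
    norm_num [Nat.toDigits_zero]
    rw [show (('0' : Char).toNat : Int) - 48 = ((0:Nat) : Int) by rfl,
      pyGet?_nat_of_lt mapping 0 h0len]
    simp [kVal]
  · have hm : 0 < n.toNat := by omega
    have hd' : ∀ d ∈ Nat.digits 10 n.toNat, d < mapping.length := by
      intro d hdm; apply hd; rw [reqDigits, if_neg (by omega)]; exact hdm
    unfold bMapVal
    rw [htc, bfold_eq mapping n.toNat hm hd' 0]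
    simp [kVal, hn]

theorem mapM_eq_map {α : Type} (f : α → Option Int) (K : α → Int) :
    ∀ (ns : List α), (∀ n ∈ ns, f n = some (K n)) → ns.mapM f = some (ns.map K) := by
  intro ns
  induction ns with
  | nil => intro _; rfl
  | cons a t ih =>
    intro h
    rw [List.mapM_cons, h a List.mem_cons_self, ih (fun n hn => h n (List.mem_cons_of_mem _ hn))]
    rfl

theorem insertBy_map {α : Type} (f : Int → α) (ltA : Int → Int → Bool) (ltB : α → α → Bool)
    (i : Int) :
    ∀ (acc : List Int), (∀ j ∈ acc, ltA i j = ltB (f i) (f j)) →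
      (PySem.List.insertBy ltA i acc).map f = PySem.List.insertBy ltB (f i) (acc.map f) := by
  intro acc
  induction acc with
  | nil => intro _; simp [PySem.List.insertBy]
  | cons y ys ih =>
    intro h
    simp only [PySem.List.insertBy, List.map_cons]
    rw [h y List.mem_cons_self]
    by_cases hb : ltB (f i) (f y) = true
    · simp [hb]
    · simp only [Bool.not_eq_true] at hb
      simp [hb, ih (fun j hj => h j (List.mem_cons_of_mem _ hj))]

theorem foldl_insertBy_map {α : Type} (f : Int → α) (ltA : Int → Int → Bool)
    (ltB : α → α → Bool) :
    ∀ (is acc : List Int), is.Pairwise (· < ·) →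
      (∀ i ∈ is, ∀ j ∈ acc, j < i) →
      (∀ i ∈ is, ∀ j, (j ∈ acc ∨ j ∈ is) → j < i → ltA i j = ltB (f i) (f j)) →
      (is.foldl (fun a x => PySem.List.insertBy ltA x a) acc).map f
        = (is.map f).foldl (fun a x => PySem.List.insertBy ltB x a) (acc.map f) := by
  intro is
  induction is with
  | nil => intro acc _ _ _; simp
  | cons i rest ih =>
    intro acc hpw hlt hcomp
    simp only [List.foldl_cons, List.map_cons]
    rw [← insertBy_map f ltA ltB i acc (fun j hj => hcomp i List.mem_cons_self j (Or.inl hj)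
      (hlt i List.mem_cons_self j hj))]
    apply ih
    · exact hpw.of_cons
    · intro i' hi' j hj
      rw [PySem.List.mem_insertBy] at hj
      have hii' : i < i' := (List.pairwise_cons.mp hpw).1 i' hi'
      rcases hj with rfl | hj
      · exact hii'
      · exact lt_trans (hlt i List.mem_cons_self j hj) hii'
    · intro i' hi' j hj hji'
      apply hcomp i' (List.mem_cons_of_mem _ hi')
      rcases hj with hj | hj
      · rw [PySem.List.mem_insertBy] at hj
        rcases hj with rfl | hj
        · exact Or.inr List.mem_cons_self
        · exact Or.inl hj
      · exact Or.inr (List.mem_cons_of_mem _ hj)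
      · exact hji'

-- ===== VERDICT (by name: the statement is the Claim_ definition above) =====
theorem sortJumbled_spec : Claim_equal_sortJumbled := by
  intro mapping nums _ hpre
  unfold Spec_sortJumbled sortJumbled sortJumbled_alt
  have hA : nums.mapM (fun n => if n = 0 then PySem.List.pyGet? mapping 0
      else aMapVal mapping (n.toNat + 1) n 0 1) = some (nums.map (kVal mapping)) :=
    mapM_eq_map _ _ nums (fun n hn => aVal_some mapping n (hpre n hn).1 (hpre n hn).2)
  have hB : nums.mapM (fun n => bMapVal mapping n) = some (nums.map (kVal mapping)) :=
    mapM_eq_map _ _ nums (fun n hn => bVal_some mapping n (hpre n hn).1 (hpre n hn).2)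
  rw [hA, hB]
  have hlen : PySem.List.len nums = ((nums.length : Nat) : Int) := rfl
  have hmem : ∀ j ∈ PySem.List.pyRange 0 (PySem.List.len nums),
      ∃ t : Nat, t < nums.length ∧ j = (t : Int) := by
    intro j hj
    rw [hlen, PySem.List.pyRange_zero_natCast] at hj
    obtain ⟨t, ht, rfl⟩ := List.mem_map.mp hj
    exact ⟨t, List.mem_range.mp ht, rfl⟩
  have hk1f : ∀ t : Nat, t < nums.length →
      PySem.List.pyGetD (nums.map (kVal mapping)) (t : Int) 0
        = (bMapVal mapping (PySem.List.pyGetD nums (t : Int) 0)).getD 0 := by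
    intro t ht
    have hget : PySem.List.pyGetD nums (t : Int) 0 = nums.getD t 0 :=
      PySem.List.pyGetD_natCast nums t 0
    have hmemn : nums.getD t 0 ∈ nums := by
      rw [List.getD_eq_getElem?_getD, List.getElem?_eq_getElem ht]
      exact List.mem_of_getElem rfl
    have hb := bVal_some mapping (nums.getD t 0) (hpre _ hmemn).1 (hpre _ hmemn).2
    rw [PySem.List.pyGetD_natCast, hget, hb]
    simp [List.getD_eq_getElem?_getD, ht]
  have hmain := foldl_insertBy_map (fun i => PySem.List.pyGetD nums i 0)
      (fun a b => decide (PySem.List.pyGetD (nums.map (kVal mapping)) a 0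
                    < PySem.List.pyGetD (nums.map (kVal mapping)) b 0)
        || (!decide (PySem.List.pyGetD (nums.map (kVal mapping)) b 0
                    < PySem.List.pyGetD (nums.map (kVal mapping)) a 0) && decide (a < b)))
      (fun a b => decide ((bMapVal mapping a).getD 0 < (bMapVal mapping b).getD 0))
      (PySem.List.pyRange 0 (PySem.List.len nums)) []
      (by
        rw [hlen, PySem.List.pyRange_zero_natCast]
        exact (List.pairwise_lt_range).map _ (fun a b h => by exact_mod_cast h))
      (by intro i _ j hj; simp at hj)
      (by
        intro i hi j hj hji
        obtain ⟨t, ht, rfl⟩ := hmem i hi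
        obtain ⟨s, hs, rfl⟩ := hmem j (hj.resolve_left (by simp))
        have h1 : decide (((t : Int)) < ((s : Int))) = false := by
          simp only [decide_eq_false_iff_not]; omega
        simp only []
        rw [h1, hk1f t ht, hk1f s hs]
        simp)
  have hid : List.map (fun i => PySem.List.pyGetD nums i 0)
      (PySem.List.pyRange 0 (PySem.List.len nums)) = nums :=
    PySem.List.map_pyGetD_pyRange_zero nums 0
  rw [hid] at hmain
  exact Eq.trans hmain (by rw [PySem.List.sorted_eq_foldl_insertBy]; simp)
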